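-- pv_equiv track=rewrite | github.com/3bde1r7man/Othello-AI | helper.py | checkFlipDown
-- ===== SOURCE A (Python) =====
-- def checkFlipDown(Board, x, y, player):
--     count = 0
--     for i in range(x + 1, 8):
--         if Board[i][y] == player:
--             if(count == i - (x + 1) and count != 0):
--                 return True
--             return False
--         elif Board[i][y] != 0 and Board[i][y] != player:
--             count += 1
--     return False
-- ===== SOURCE B (Python) =====
-- def checkFlipDown(Board, x, y, player):
--     return any(
--         Board[j][y] == player
--         and all(Board[i][y] != 0 and Board[i][y] != player
--                 for i in range(x + 1, j))
--         for j in range(x + 2, 8)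
--     )
-- ===== Notes on version B (the rewrite author's own statement) =====
-- stated objective: alternative
-- what changed: B is a declarative existential: any() over candidate end squares j of a player stone whose whole gap (x+1..j-1) is opponents (checked by an inner all()), replacing A's single stateful scan with an opponent counter compared against the span (count == i-(x+1)).
-- outside the precondition, e.g. on checkFlipDown([[1], [1]], 0, 0, 1): A returns False, B raises IndexError
import Mathlib
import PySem

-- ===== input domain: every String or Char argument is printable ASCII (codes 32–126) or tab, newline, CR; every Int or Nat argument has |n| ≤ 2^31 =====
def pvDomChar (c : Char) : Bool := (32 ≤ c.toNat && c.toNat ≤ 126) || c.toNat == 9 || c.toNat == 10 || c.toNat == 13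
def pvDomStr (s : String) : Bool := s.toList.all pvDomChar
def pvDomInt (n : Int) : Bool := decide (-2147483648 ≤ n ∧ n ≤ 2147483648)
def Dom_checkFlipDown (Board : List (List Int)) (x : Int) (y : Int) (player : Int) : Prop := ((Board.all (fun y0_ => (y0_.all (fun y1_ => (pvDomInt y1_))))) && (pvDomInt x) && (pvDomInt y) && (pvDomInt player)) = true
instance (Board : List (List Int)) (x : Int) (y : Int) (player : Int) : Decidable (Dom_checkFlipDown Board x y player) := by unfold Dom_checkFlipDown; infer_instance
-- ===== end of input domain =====

-- B replaces A's stateful downward scan (opponent counter compared with the span, count == i-(x+1))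
-- by a declarative existential: any end square j ∈ range(x+2,8) holding a player stone whose whole
-- gap range(x+1,j) is opponent stones (inner all()); objective: alternative. Equality of the return
-- values is proved on Pre_ (every scanned cell addressable).

-- ===== PORT A =====
-- for i in range(x+1, 8): early-return loop, carried state = count; xp1 = x + 1.
def chkLoopA (Board : List (List Int)) (y player xp1 : Int) : List Int → Int → Bool
  | [], _ => false
  | i :: rest, count =>
    match PySem.List.pyGet? Board i with
    | none => false        -- IndexError in Python; excluded by Pre_
    | some row =>
      match PySem.List.pyGet? row y with
      | none => false      -- IndexError in Python; excluded by Pre_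
      | some v =>
        if v = player then
          decide (count = i - xp1 ∧ count ≠ 0)
        else if v ≠ 0 ∧ v ≠ player then
          chkLoopA Board y player xp1 rest (count + 1)
        else
          chkLoopA Board y player xp1 rest count

def checkFlipDown (Board : List (List Int)) (x : Int) (y : Int) (player : Int) : Bool :=
  chkLoopA Board y player (x + 1) (PySem.List.pyRange (x + 1) 8 1) 0

-- ===== PORT B =====
-- Board[i][y]; the default 0 on a missing index is unreachable under Pre_ (Python raises there).
def pvCell (Board : List (List Int)) (y i : Int) : Int :=
  ((PySem.List.pyGet? Board i).bind (fun row => PySem.List.pyGet? row y)).getD 0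

-- any(Board[j][y] == player and all(... for i in range(x+1, j)) for j in range(x+2, 8))
def checkFlipDown_alt (Board : List (List Int)) (x : Int) (y : Int) (player : Int) : Bool :=
  (PySem.List.pyRange (x + 2) 8 1).any (fun j =>
    (pvCell Board y j == player) &&
    (PySem.List.pyRange (x + 1) j 1).all (fun i =>
      pvCell Board y i != 0 && pvCell Board y i != player))

-- ===== PRECONDITION & SPEC =====
-- Pre_ requires every cell Board[i][y] for i in range(x+1, 8) to be addressable (the standard 8×8
-- board always satisfies this).  It also excludes inputs where A returns early at a player stone
-- before reaching an out-of-range cell: B scans further there and raises.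
-- (the first conjunct and the clamp at -len(Board) only keep the condition quickly decidable for
-- very negative x: below -len(Board) the very first access raises anyway)
def Pre_checkFlipDown (Board : List (List Int)) (x : Int) (y : Int) (player : Int) : Prop :=
  ((8 : Int) ≤ x + 1 ∨ -(Board.length : Int) ≤ x + 1) ∧
  ∀ i ∈ PySem.List.pyRange (max (x + 1) (-(Board.length : Int))) 8 1,
    ((PySem.List.pyGet? Board i).bind (fun row => PySem.List.pyGet? row y)).isSome = true
instance (Board : List (List Int)) (x : Int) (y : Int) (player : Int) : Decidable (Pre_checkFlipDown Board x y player) := by unfold Pre_checkFlipDown; infer_instance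

def pvWitness_checkFlipDown : List (List Int) × Int × Int × Int :=
  ([[0,0,0,0,0,0,0,0],[0,0,0,0,0,0,0,0],[0,0,0,0,0,0,0,0],[0,0,0,0,0,0,0,0],
    [0,0,0,0,0,0,0,0],[0,0,0,0,0,0,0,0],[0,0,0,0,0,0,0,0],[0,0,0,0,0,0,0,0]], 0, 0, 1)

def Spec_checkFlipDown (Board : List (List Int)) (x : Int) (y : Int) (player : Int) (out : Bool) : Prop := out = checkFlipDown_alt Board x y player
instance (Board : List (List Int)) (x : Int) (y : Int) (player : Int) (out : Bool) : Decidable (Spec_checkFlipDown Board x y player out) := by unfold Spec_checkFlipDown; infer_instance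

-- ===== CLAIM (what is proved, stated in full; the proofs are below) =====
def Claim_equal_checkFlipDown : Prop := ∀ (Board : List (List Int)) (x : Int) (y : Int) (player : Int), Dom_checkFlipDown Board x y player → Pre_checkFlipDown Board x y player → Spec_checkFlipDown Board x y player (checkFlipDown Board x y player)

-- ===== LEMMAS AND PROOFS =====

-- Pre_ gives validity of every access on the unclamped index range.
lemma pre_strong (Board : List (List Int)) (x y player : Int)
    (h : Pre_checkFlipDown Board x y player) :
    ∀ i ∈ PySem.List.pyRange (x + 1) 8 1,
      ((PySem.List.pyGet? Board i).bind (fun row => PySem.List.pyGet? row y)).isSome = true := by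
  intro i hi
  obtain ⟨hb, hv⟩ := h
  have hir := PySem.List.mem_pyRange_one.mp hi
  have hb' : -(Board.length : Int) ≤ x + 1 := by
    rcases hb with h8 | h8
    · omega
    · exact h8
  have hmax : max (x + 1) (-(Board.length : Int)) = x + 1 := max_eq_left hb'
  exact hv i (by rw [hmax]; exact PySem.List.mem_pyRange_one.mpr hir)

-- abbreviation used only in the proofs: B's disjunct for end square j
def bDisj (Board : List (List Int)) (y player xp1 j : Int) : Bool :=
  (pvCell Board y j == player) &&
  (PySem.List.pyRange xp1 j 1).all (fun i =>
    pvCell Board y i != 0 && pvCell Board y i != player)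

-- If some already-scanned cell m ∈ [xp1, a) holds a player stone, every disjunct j ≥ a is false.
lemma any_false_of_player_before (Board : List (List Int)) (y player xp1 a m : Int)
    (hm1 : xp1 ≤ m) (hm2 : m < a) (hp : pvCell Board y m = player) :
    (PySem.List.pyRange a 8 1).any (bDisj Board y player xp1) = false := by
  rw [List.any_eq_false]
  intro j hj
  have hjr := PySem.List.mem_pyRange_one.mp hj
  have hmem : m ∈ PySem.List.pyRange xp1 j 1 :=
    PySem.List.mem_pyRange_one.mpr ⟨hm1, by omega⟩
  unfold bDisj
  simp only [Bool.not_eq_true, Bool.and_eq_false_iff]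
  right
  rw [List.all_eq_false]
  exact ⟨m, hmem, by simp [hp]⟩

-- Main invariant: from index a ≥ xp1+1, with no player stone among the scanned cells [xp1, a) and
-- count = number of opponent stones there, A's loop equals B's any over the remaining end squares.
lemma loop_eq_any (Board : List (List Int)) (y player xp1 : Int)
    (hv : ∀ i ∈ PySem.List.pyRange xp1 8 1,
      ((PySem.List.pyGet? Board i).bind (fun r => PySem.List.pyGet? r y)).isSome = true) :
    ∀ (n : Nat) (a : Int), (8 : Int) - a = (n : Int) → xp1 + 1 ≤ a →
    (∀ i ∈ PySem.List.pyRange xp1 a 1, pvCell Board y i ≠ player) →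
    chkLoopA Board y player xp1 (PySem.List.pyRange a 8 1)
      ((((PySem.List.pyRange xp1 a 1).map (pvCell Board y)).countP
          (fun v => v != 0 && v != player) : Int))
    = (PySem.List.pyRange a 8 1).any (bDisj Board y player xp1) := by
  intro n
  induction n with
  | zero =>
    intro a ha _ _
    have h8 : (8 : Int) ≤ a := by omega
    rw [PySem.List.pyRange_one_eq_nil h8]
    simp [chkLoopA]
  | succ m ih =>
    intro a ha hxa hnp
    have hlt : a < 8 := by omega
    have hxlt : xp1 < 8 := by omega
    rw [PySem.List.pyRange_one_cons hlt]
    have hva := hv a (PySem.List.mem_pyRange_one.mpr ⟨by omega, hlt⟩)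
    obtain ⟨row, hrow⟩ : ∃ row, PySem.List.pyGet? Board a = some row := by
      cases h : PySem.List.pyGet? Board a with
      | none => rw [h] at hva; simp at hva
      | some r => exact ⟨r, rfl⟩
    rw [hrow, Option.bind_some] at hva
    obtain ⟨v, hval⟩ : ∃ v, PySem.List.pyGet? row y = some v := by
      cases h : PySem.List.pyGet? row y with
      | none => rw [h] at hva; simp at hva
      | some r => exact ⟨r, rfl⟩
    have hcell : pvCell Board y a = v := by simp [pvCell, hrow, hval]
    -- prefix facts
    set pre := (PySem.List.pyRange xp1 a 1).map (pvCell Board y) with hpre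
    have hprelen : (pre.length : Int) = a - xp1 := by
      rw [hpre, List.length_map, PySem.List.length_pyRange_one]
      omega
    have hpresucc : (PySem.List.pyRange xp1 (a + 1) 1).map (pvCell Board y) = pre ++ [pvCell Board y a] := by
      rw [PySem.List.pyRange_one_succ_right (by omega), List.map_append, List.map_singleton]
    have hstep : ∀ c, chkLoopA Board y player xp1 (a :: PySem.List.pyRange (a + 1) 8 1) c =
        (if v = player then decide (c = a - xp1 ∧ c ≠ 0)
         else if v ≠ 0 ∧ v ≠ player then
           chkLoopA Board y player xp1 (PySem.List.pyRange (a + 1) 8 1) (c + 1)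
         else chkLoopA Board y player xp1 (PySem.List.pyRange (a + 1) 8 1) c) := by
      intro c
      simp only [chkLoopA, hrow, hval]
    rw [hstep]
    by_cases hp : v = player
    · -- player stone at a: A returns decide(count = span ∧ count ≠ 0); B's only live disjunct is j = a
      rw [if_pos hp, List.any_cons]
      have hrest : (PySem.List.pyRange (a + 1) 8 1).any (bDisj Board y player xp1) = false :=
        any_false_of_player_before Board y player xp1 (a + 1) a (by omega) (by omega)
          (by rw [hcell, hp])
      rw [hrest, Bool.or_false]
      unfold bDisj
      rw [hcell, hp]
      simp only [beq_self_eq_true, Bool.true_and]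
      -- decide(count = a - xp1 ∧ count ≠ 0) = all prefix opponents
      have hcle : pre.countP (fun v => v != 0 && v != player) ≤ pre.length := List.countP_le_length
      have hiff : (pre.countP (fun v => v != 0 && v != player) = pre.length)
          ↔ ((PySem.List.pyRange xp1 a 1).all (fun i =>
              pvCell Board y i != 0 && pvCell Board y i != player) = true) := by
        rw [List.countP_eq_length, List.all_eq_true]
        constructor
        · intro h i hi
          exact h (pvCell Board y i) (List.mem_map_of_mem hi)
        · intro h c hc
          obtain ⟨i, hi, rfl⟩ := List.mem_map.mp hc
          exact h i hi
      by_cases hall : (PySem.List.pyRange xp1 a 1).all (fun i =>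
          pvCell Board y i != 0 && pvCell Board y i != player) = true
      · have hce : pre.countP (fun v => v != 0 && v != player) = pre.length := hiff.mpr hall
        rw [hall, decide_eq_true_iff]
        constructor
        · omega
        · omega
      · have hcne : pre.countP (fun v => v != 0 && v != player) ≠ pre.length :=
          fun h => hall (hiff.mp h)
        rw [Bool.eq_false_iff.mpr hall, decide_eq_false_iff_not]
        intro h
        obtain ⟨h1, -⟩ := h
        exact hcne (by omega)
    · -- not a player stone: A recurses (count bumped iff opponent); B's disjunct at j = a is dead
      rw [if_neg hp, List.any_cons]
      have hdead : bDisj Board y player xp1 a = false := by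
        unfold bDisj
        rw [hcell]
        simp [hp]
      rw [hdead, Bool.false_or]
      have hnp' : ∀ i ∈ PySem.List.pyRange xp1 (a + 1) 1, pvCell Board y i ≠ player := by
        intro i hi
        have := PySem.List.mem_pyRange_one.mp hi
        by_cases hia : i = a
        · rw [hia, hcell]; exact hp
        · exact hnp i (PySem.List.mem_pyRange_one.mpr ⟨by omega, by omega⟩)
      have hihsucc := ih (a + 1) (by omega) (by omega) hnp'
      by_cases hz : v ≠ 0 ∧ v ≠ player
      · rw [if_pos hz, ← hihsucc]
        congr 1
        rw [hpresucc, List.countP_append, hcell]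
        have : (fun v => v != 0 && v != player) v = true := by
          simp [hz.1, hz.2]
        simp [this]
      · rw [if_neg hz, ← hihsucc]
        congr 1
        rw [hpresucc, List.countP_append, hcell]
        have : (fun v => v != 0 && v != player) v = false := by
          rcases not_and_or.mp hz with h | h
          · simp [not_not.mp h]
          · exact absurd (not_not.mp h) hp
        simp [this]

-- ===== VERDICT (by name: the statement is the Claim_ definition above) =====
theorem checkFlipDown_spec : Claim_equal_checkFlipDown := by
  intro Board x y player _ hpre
  unfold Spec_checkFlipDown checkFlipDown checkFlipDown_alt
  have hv := pre_strong Board x y player hpre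
  have hB : ∀ a, (PySem.List.pyRange a 8 1).any (fun j =>
      (pvCell Board y j == player) &&
      (PySem.List.pyRange (x + 1) j 1).all (fun i =>
        pvCell Board y i != 0 && pvCell Board y i != player))
      = (PySem.List.pyRange a 8 1).any (bDisj Board y player (x + 1)) := by
    intro a; rfl
  rw [hB]
  by_cases h8 : (8 : Int) ≤ x + 1
  · rw [PySem.List.pyRange_one_eq_nil h8, PySem.List.pyRange_one_eq_nil (by omega)]
    simp [chkLoopA]
  · -- unfold A's first step at i = x+1, then apply the invariant from a = x+2
    have hlt : x + 1 < 8 := by omega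
    rw [PySem.List.pyRange_one_cons hlt, show x + 1 + 1 = x + 2 by ring]
    have hva := hv (x + 1) (PySem.List.mem_pyRange_one.mpr ⟨le_refl _, hlt⟩)
    obtain ⟨row, hrow⟩ : ∃ row, PySem.List.pyGet? Board (x + 1) = some row := by
      cases h : PySem.List.pyGet? Board (x + 1) with
      | none => rw [h] at hva; simp at hva
      | some r => exact ⟨r, rfl⟩
    rw [hrow, Option.bind_some] at hva
    obtain ⟨v, hval⟩ : ∃ v, PySem.List.pyGet? row y = some v := by
      cases h : PySem.List.pyGet? row y with
      | none => rw [h] at hva; simp at hva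
      | some r => exact ⟨r, rfl⟩
    have hcell : pvCell Board y (x + 1) = v := by simp [pvCell, hrow, hval]
    have hstep : chkLoopA Board y player (x + 1) ((x + 1) :: PySem.List.pyRange (x + 2) 8 1) 0 =
        (if v = player then decide ((0 : Int) = (x + 1) - (x + 1) ∧ (0 : Int) ≠ 0)
         else if v ≠ 0 ∧ v ≠ player then
           chkLoopA Board y player (x + 1) (PySem.List.pyRange (x + 2) 8 1) (0 + 1)
         else chkLoopA Board y player (x + 1) (PySem.List.pyRange (x + 2) 8 1) 0) := by
      simp only [chkLoopA, hrow, hval]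
    rw [hstep]
    have hsingleton : PySem.List.pyRange (x + 1) (x + 2) 1 = [x + 1] := by
      have := PySem.List.pyRange_one_singleton (x + 1)
      rw [show x + 1 + 1 = x + 2 by ring] at this
      exact this
    by_cases hp : v = player
    · -- first cell is a player stone: A returns False, every disjunct of B is dead
      rw [if_pos hp]
      rw [any_false_of_player_before Board y player (x + 1) (x + 2) (x + 1) (le_refl _)
        (by omega) (by rw [hcell, hp])]
      simp
    · rw [if_neg hp]
      have hnp1 : ∀ i ∈ PySem.List.pyRange (x + 1) (x + 2) 1, pvCell Board y i ≠ player := by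
        intro i hi
        rw [hsingleton] at hi
        rw [List.mem_singleton.mp hi, hcell]
        exact hp
      have hcnt : ((((PySem.List.pyRange (x + 1) (x + 2) 1).map (pvCell Board y)).countP
            (fun v => v != 0 && v != player) : Int))
          = if v ≠ 0 ∧ v ≠ player then (1 : Int) else 0 := by
        rw [hsingleton, List.map_singleton, List.countP_singleton, hcell]
        by_cases hz : v ≠ 0 ∧ v ≠ player
        · simp [hz.1, hz.2]
        · rcases not_and_or.mp hz with h | h
          · simp [not_not.mp h]
          · exact absurd (not_not.mp h) hp
      have hinv := loop_eq_any Board y player (x + 1) hv (8 - (x + 2)).toNat (x + 2)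
        (by omega) (by omega) hnp1
      rw [hcnt] at hinv
      by_cases hz : v ≠ 0 ∧ v ≠ player
      · rw [if_pos hz]
        rw [if_pos hz] at hinv
        exact hinv
      · rw [if_neg hz]
        rw [if_neg hz] at hinv
        exact hinv
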